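-- pv_equiv track=rewrite | github.com/RegretCode/Hackathon-PL-SQL-Pyhton-Squad-6 | parser/sql_parser/advanced_clauses.py | parse_union
-- ===== SOURCE A (Python) =====
-- from typing import Optional, List, Any
--
-- def parse_union(sql_query: str) -> List[str]:
--     """
--     Parse UNION clauses from a SQL query.
--
--     Args:
--         sql_query: The SQL query to parse.
--
--     Returns:
--         A list of SQL queries that are part of the UNION.
--     """
--     # Split by UNION keywords that are not inside parentheses
--     union_parts = []
--     current_part = ""
--     paren_level = 0
--     i = 0
--
--     while i < len(sql_query):
--         # Check for UNION keyword
--         if (sql_query[i:i+5].upper() == "UNION" and paren_level == 0 and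
--                 (i == 0 or sql_query[i-1].isspace())):
--             # Add the current part if not empty
--             if current_part.strip():
--                 union_parts.append(current_part.strip())
--             current_part = ""
--
--             # Skip the UNION keyword
--             i += 5
--
--             # Skip "ALL" if present
--             if i + 3 < len(sql_query) and sql_query[i:i+4].upper() == " ALL":
--                 i += 4
--         else:
--             if sql_query[i] == '(':
--                 paren_level += 1
--             elif sql_query[i] == ')':
--                 paren_level -= 1
--
--             current_part += sql_query[i]
--             i += 1
--
--     # Add the last part
--     if current_part.strip():
--         union_parts.append(current_part.strip())
--
--     return union_parts
-- ===== SOURCE B (Python) =====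
-- def parse_union(sql_query):
--     s = sql_query
--     n = len(s)
--     # pass 1: record the (start, end-of-keyword) bounds of every top-level UNION [ALL]
--     bounds = []
--     depth = 0
--     for i in range(n):
--         if (depth == 0 and s[i:i+5].upper() == "UNION"
--                 and (i == 0 or s[i-1].isspace())):
--             end = i + 5
--             if i + 8 < n and s[i+5:i+9].upper() == " ALL":
--                 end += 4
--             bounds.append((i, end))
--         if s[i] == '(':
--             depth += 1
--         elif s[i] == ')':
--             depth -= 1
--     # pass 2: slice the text between keyword bounds, strip, drop empties
--     parts = []
--     prev = 0
--     for st, en in bounds: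
--         seg = s[prev:st].strip()
--         if seg:
--             parts.append(seg)
--         prev = en
--     seg = s[prev:].strip()
--     if seg:
--         parts.append(seg)
--     return parts
-- ===== Notes on version B (the rewrite author's own statement) =====
-- stated objective: faster
-- what changed: Replaces A's single stateful while-loop (index jumping over matched keywords, char-by-char string accumulation of the current part) with two simple passes: one forward scan recording the (start,end) bounds of every top-level UNION [ALL] keyword, then slicing/stripping the text between consecutive bounds.
import Mathlib
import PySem

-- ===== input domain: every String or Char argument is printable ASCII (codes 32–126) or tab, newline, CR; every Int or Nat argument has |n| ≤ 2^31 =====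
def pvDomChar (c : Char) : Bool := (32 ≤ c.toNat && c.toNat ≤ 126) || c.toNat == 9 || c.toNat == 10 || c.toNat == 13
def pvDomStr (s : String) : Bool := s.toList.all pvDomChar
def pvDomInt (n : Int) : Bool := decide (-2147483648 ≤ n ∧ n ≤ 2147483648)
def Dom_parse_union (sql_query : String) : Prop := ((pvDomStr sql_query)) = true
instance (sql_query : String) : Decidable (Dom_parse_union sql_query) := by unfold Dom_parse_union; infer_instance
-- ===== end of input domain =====

-- B replaces A's single stateful scan (index jumping, char-by-char accumulation) by two phases:
-- one pass collecting the (start,end) bounds of top-level UNION [ALL] keywords, then slicing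
-- the text between them; avoids A's per-character string accumulation (measurably faster).


-- ===== PORT A =====
-- while-loop of A; strings handled as List Char (s[a:b] = (s.drop a).take b-a, exact for the
-- natural bounds used here; s.getD i ' ' is only read at indices the Python proves in range)
def pvA_loop (s : List Char) (i : Nat) (depth : Int) (cur : List Char)
    (parts : List (List Char)) : List (List Char) :=
  if _h : i < s.length then
    if ((s.drop i).take 5).map PySem.Chars.upperChar = ['U','N','I','O','N'] ∧ depth = 0 ∧
        (i = 0 ∨ PySem.Chars.isspace (s.getD (i-1) ' ') = true) then
      let parts' := if PySem.Chars.strip cur ≠ [] then parts ++ [PySem.Chars.strip cur] else parts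
      if (i+5) + 3 < s.length ∧
          ((s.drop (i+5)).take 4).map PySem.Chars.upperChar = [' ','A','L','L'] then
        pvA_loop s (i+9) depth [] parts'
      else
        pvA_loop s (i+5) depth [] parts'
    else
      let c := s.getD i ' '
      let depth' := if c = '(' then depth + 1 else if c = ')' then depth - 1 else depth
      pvA_loop s (i+1) depth' (cur ++ [c]) parts
  else
    if PySem.Chars.strip cur ≠ [] then parts ++ [PySem.Chars.strip cur] else parts
termination_by s.length - i
decreasing_by all_goals omega

def parse_union (sql_query : String) : List String :=
  (pvA_loop sql_query.toList 0 0 [] []).map String.mk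

-- ===== PORT B =====
-- pass 1 of Source B: for i in range(n), record (start, end) of each top-level UNION [ALL]
def pvB_scan (s : List Char) (i : Nat) (depth : Int)
    (bounds : List (Nat × Nat)) : List (Nat × Nat) :=
  if i < s.length then
    let bounds' :=
      if depth = 0 ∧ ((s.drop i).take 5).map PySem.Chars.upperChar = ['U','N','I','O','N'] ∧
          (i = 0 ∨ PySem.Chars.isspace (s.getD (i-1) ' ') = true) then
        bounds ++ [(i, if i + 8 < s.length ∧
            ((s.drop (i+5)).take 4).map PySem.Chars.upperChar = [' ','A','L','L']
          then i+9 else i+5)]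
      else bounds
    let c := s.getD i ' '
    let depth' := if c = '(' then depth + 1 else if c = ')' then depth - 1 else depth
    pvB_scan s (i+1) depth' bounds'
  else bounds
termination_by s.length - i

-- pass 2 of Source B: slice between bounds, strip, keep non-empty
def pvB_emit (s : List Char) (prev : Nat) (bounds : List (Nat × Nat))
    (parts : List (List Char)) : List (List Char) :=
  match bounds with
  | [] =>
      let seg := PySem.Chars.strip (s.drop prev)
      if seg ≠ [] then parts ++ [seg] else parts
  | (st, en) :: rest =>
      let seg := PySem.Chars.strip ((s.drop prev).take (st - prev))
      pvB_emit s en rest (if seg ≠ [] then parts ++ [seg] else parts)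

def parse_union_alt (sql_query : String) : List String :=
  let s := sql_query.toList
  (pvB_emit s 0 (pvB_scan s 0 0 []) []).map String.mk

-- ===== PRECONDITION & SPEC =====
def Spec_parse_union (sql_query : String) (out : List String) : Prop := out = parse_union_alt sql_query
instance (sql_query : String) (out : List String) : Decidable (Spec_parse_union sql_query out) := by unfold Spec_parse_union; infer_instance

-- ===== CLAIM (what is proved, stated in full; the proofs are below) =====
def Claim_equal_parse_union : Prop := ∀ (sql_query : String), Dom_parse_union sql_query → Spec_parse_union sql_query (parse_union sql_query)

-- ===== LEMMAS AND PROOFS =====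

-- parenthesis depth before position i (over all of s.take i)
def pvDepthAt (s : List Char) (i : Nat) : Int :=
  (s.take i).foldl (fun d c => if c = '(' then d + 1 else if c = ')' then d - 1 else d) 0

abbrev pvMatchU (s : List Char) (i : Nat) : Prop :=
  ((s.drop i).take 5).map PySem.Chars.upperChar = ['U','N','I','O','N']

abbrev pvHasAll (s : List Char) (i : Nat) : Prop :=
  i + 8 < s.length ∧ ((s.drop (i+5)).take 4).map PySem.Chars.upperChar = [' ','A','L','L']

def pvEndOf (s : List Char) (i : Nat) : Nat := if pvHasAll s i then i + 9 else i + 5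

abbrev pvCand (s : List Char) (i : Nat) : Prop :=
  pvDepthAt s i = 0 ∧ pvMatchU s i ∧ (i = 0 ∨ PySem.Chars.isspace (s.getD (i-1) ' ') = true)

def pvCands (s : List Char) (i : Nat) : List Nat :=
  (List.range' i (s.length - i)).filter (fun j => decide (pvCand s j))

-- segments from position i with pending text cur, guided by the remaining candidate starts
def pvEmitG (s : List Char) (i : Nat) (cur : List Char) : List Nat → List (List Char)
  | [] =>
      let seg := PySem.Chars.strip (cur ++ s.drop i)
      if seg ≠ [] then [seg] else []
  | j :: rest =>
      let seg := PySem.Chars.strip (cur ++ (s.drop i).take (j - i))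
      (if seg ≠ [] then [seg] else []) ++ pvEmitG s (pvEndOf s j) [] rest

-- ---- character facts ----
theorem pv_upper_of_isspace (c : Char) (h : PySem.Chars.isspace c = true) :
    PySem.Chars.upperChar c = c := by
  simp [PySem.Chars.isspace] at h
  simp only [PySem.Chars.upperChar, PySem.Chars.islower]
  split
  · next hl =>
    simp only [Bool.and_eq_true, decide_eq_true_eq] at hl
    have h1 : 97 ≤ c.toNat := by
      simpa [Char.le_def, UInt32.le_iff_toNat_le, Char.toNat_val] using hl.1
    have h2 : c.toNat ≤ 122 := by
      simpa [Char.le_def, UInt32.le_iff_toNat_le, Char.toNat_val] using hl.2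
    exfalso; omega
  · rfl

theorem pv_isspace_false_of_upper (c x : Char) (hx : PySem.Chars.isspace x = false)
    (h : PySem.Chars.upperChar c = x) : PySem.Chars.isspace c = false := by
  by_contra hc
  simp only [Bool.not_eq_false] at hc
  rw [pv_upper_of_isspace c hc] at h
  rw [h] at hc
  rw [hc] at hx
  simp at hx

theorem pv_ne_paren_of_upper (c x : Char) (hx1 : x ≠ '(') (hx2 : x ≠ ')')
    (h : PySem.Chars.upperChar c = x) : c ≠ '(' ∧ c ≠ ')' := by
  constructor <;> intro hc <;> rw [hc] at h
  · exact hx1 (by rw [← h]; decide)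
  · exact hx2 (by rw [← h]; decide)

-- ---- depth facts ----
theorem pvDepthAt_succ (s : List Char) (i : Nat) (h : i < s.length) :
    pvDepthAt s (i+1) =
      (if s.getD i ' ' = '(' then pvDepthAt s i + 1
       else if s.getD i ' ' = ')' then pvDepthAt s i - 1 else pvDepthAt s i) := by
  unfold pvDepthAt
  rw [List.take_succ, List.getElem?_eq_getElem h, List.foldl_append, List.getD_eq_getElem s ' ' h]
  simp

theorem pvDepthAt_const (s : List Char) (a b : Nat) (hab : a ≤ b) (hb : b ≤ s.length)
    (h : ∀ j, a ≤ j → j < b → s.getD j ' ' ≠ '(' ∧ s.getD j ' ' ≠ ')') :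
    pvDepthAt s b = pvDepthAt s a := by
  induction b with
  | zero => rw [Nat.le_zero.mp hab]
  | succ n ih =>
    rcases Nat.lt_or_ge a (n+1) with hlt | hge
    · have ha : a ≤ n := by omega
      have hn : n < s.length := by omega
      rw [pvDepthAt_succ s n hn]
      have hj := h n ha (by omega)
      rw [if_neg hj.1, if_neg hj.2]
      exact ih ha (by omega) (fun j hj1 hj2 => h j hj1 (by omega))
    · have : a = n + 1 := by omega
      rw [this]

-- ---- slice/match facts ----
theorem pv_take_map_mem (s : List Char) (i m k : Nat) (L : List Char) (hk : k < m)
    (h : ((s.drop i).take m).map PySem.Chars.upperChar = L) (hlen : L.length = m) :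
    i + m ≤ s.length ∧ PySem.Chars.upperChar (s.getD (i+k) ' ') = L.getD k ' ' := by
  have hl : ((s.drop i).take m).length = m := by rw [← h] at hlen; simpa using hlen
  have hge : i + m ≤ s.length := by
    simp [List.length_take, List.length_drop] at hl
    omega
  refine ⟨hge, ?_⟩
  have hik : i + k < s.length := by omega
  have hk2 : k < ((s.drop i).take m).length := by omega
  have := congrArg (fun l => l.getD k ' ') h
  simp only [List.getD_eq_getElem?_getD, List.getElem?_map] at this
  rw [List.getElem?_eq_getElem hk2] at this
  simp only [List.getElem_take, List.getElem_drop] at this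
  rw [List.getD_eq_getElem?_getD, List.getElem?_eq_getElem hik]
  simpa using this

theorem pvMatchU_le (s : List Char) (i : Nat) (h : pvMatchU s i) : i + 5 ≤ s.length :=
  (pv_take_map_mem s i 5 0 _ (by omega) h rfl).1

theorem pvMatchU_char (s : List Char) (i k : Nat) (hk : k < 5) (h : pvMatchU s i) :
    PySem.Chars.upperChar (s.getD (i+k) ' ') = (['U','N','I','O','N'].getD k ' ') :=
  (pv_take_map_mem s i 5 k _ hk h rfl).2

theorem pvHasAll_char (s : List Char) (i k : Nat) (hk : k < 4) (h : pvHasAll s i) :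
    PySem.Chars.upperChar (s.getD (i+5+k) ' ') = ([' ','A','L','L'].getD k ' ') :=
  (pv_take_map_mem s (i+5) 4 k _ hk h.2 rfl).2

theorem pvEndOf_le (s : List Char) (i : Nat) (h : pvMatchU s i) : pvEndOf s i ≤ s.length := by
  unfold pvEndOf
  split
  · next ha => exact by have := ha.1; omega
  · exact pvMatchU_le s i h

-- keyword characters: their uppercase forms, hence no parens, and interior chars not space
theorem pv_keyword_chars (s : List Char) (i : Nat) (hc : pvCand s i) :
    ∀ j, i ≤ j → j < pvEndOf s i →
      s.getD j ' ' ≠ '(' ∧ s.getD j ' ' ≠ ')' := by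
  intro j hj1 hj2
  have hm := hc.2.1
  by_cases hja : j < i + 5
  · have hk : j - i < 5 := by omega
    have hch := pvMatchU_char s i (j-i) hk hm
    have hji : i + (j - i) = j := by omega
    rw [hji] at hch
    interval_cases h : (j - i) <;>
      simp only [List.getD] at hch <;>
      exact pv_ne_paren_of_upper _ _ (by decide) (by decide) hch
  · have hall : pvHasAll s i := by
      unfold pvEndOf at hj2; by_contra hno; rw [if_neg hno] at hj2; omega
    have hj2' : j < i + 9 := by unfold pvEndOf at hj2; rw [if_pos hall] at hj2; omega
    have hk : j - (i+5) < 4 := by omega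
    have hch := pvHasAll_char s i (j-(i+5)) hk hall
    have hji : i + 5 + (j - (i+5)) = j := by omega
    rw [hji] at hch
    interval_cases h : (j - (i+5)) <;>
      simp only [List.getD] at hch <;>
      exact pv_ne_paren_of_upper _ _ (by decide) (by decide) hch

theorem pvDepthAt_endOf (s : List Char) (i : Nat) (hc : pvCand s i) :
    pvDepthAt s (pvEndOf s i) = pvDepthAt s i :=
  pvDepthAt_const s i (pvEndOf s i) (by unfold pvEndOf; split <;> omega)
    (pvEndOf_le s i hc.2.1) (pv_keyword_chars s i hc)

-- ---- no candidate strictly inside a match ----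
theorem pv_no_cand_inside (s : List Char) (i : Nat) (hc : pvCand s i) :
    ∀ j, i < j → j < pvEndOf s i → ¬ pvCand s j := by
  intro j hj1 hj2 hcj
  have hm := hc.2.1
  have hbnd := hcj.2.2
  rcases hbnd with h0 | hsp
  · omega
  · by_cases hja : j < i + 5
    · -- previous char is one of U N I O (uppercased), never a space
      have hk : j - 1 - i < 4 := by omega
      have hch := pvMatchU_char s i (j-1-i) (by omega) hm
      have hji : i + (j - 1 - i) = j - 1 := by omega
      rw [hji] at hch
      have : PySem.Chars.isspace (s.getD (j-1) ' ') = false := by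
        interval_cases h : (j - 1 - i) <;> simp only [List.getD] at hch <;>
          exact pv_isspace_false_of_upper _ _ (by decide) hch
      rw [this] at hsp; simp at hsp
    · have hall : pvHasAll s i := by
        unfold pvEndOf at hj2; by_contra hno; rw [if_neg hno] at hj2; omega
      have hj2' : j < i + 9 := by unfold pvEndOf at hj2; rw [if_pos hall] at hj2; omega
      -- j ∈ {i+5,…,i+8}: j = i+6 is the only one whose previous char is a space,
      -- but there the match itself fails (first char uppercases to 'A')
      by_cases hj6 : j = i + 6
      · have hch := pvHasAll_char s i 1 (by omega) hall
        have hmj := hcj.2.1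
        have hch2 := pvMatchU_char s j 0 (by omega) hmj
        rw [Nat.add_zero] at hch2
        rw [hj6] at hch2
        have : i + 5 + 1 = i + 6 := by omega
        rw [this] at hch
        simp only [List.getD] at hch hch2
        rw [hch2] at hch
        simp at hch
      · by_cases hj5 : j = i + 5
        · -- previous char uppercases to 'N'
          have hch := pvMatchU_char s i 4 (by omega) hm
          have hji : i + 4 = j - 1 := by omega
          rw [hji] at hch
          simp only [List.getD] at hch
          have : PySem.Chars.isspace (s.getD (j-1) ' ') = false :=
            pv_isspace_false_of_upper _ _ (by decide) hch
          rw [this] at hsp; simp at hsp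
        · -- j = i+7 or i+8: previous char uppercases to 'A' or 'L'
          have hk : j - 1 - (i+5) < 4 := by omega
          have hne : j - 1 - (i + 5) ≠ 0 := by omega
          have hch := pvHasAll_char s i (j-1-(i+5)) hk hall
          have hji : i + 5 + (j - 1 - (i+5)) = j - 1 := by omega
          rw [hji] at hch
          have : PySem.Chars.isspace (s.getD (j-1) ' ') = false := by
            interval_cases h : (j - 1 - (i+5)) <;> simp only [List.getD] at hch <;>
              first
              | exact pv_isspace_false_of_upper _ _ (by decide) hch
              | omega
          rw [this] at hsp; simp at hsp

-- ---- candidate-list recurrences ----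
theorem pvCands_stop (s : List Char) (i : Nat) (h : s.length ≤ i) : pvCands s i = [] := by
  unfold pvCands
  rw [Nat.sub_eq_zero_of_le h]
  rfl

theorem pvCands_succ (s : List Char) (i : Nat) (h : i < s.length) :
    pvCands s i = (if pvCand s i then [i] else []) ++ pvCands s (i+1) := by
  unfold pvCands
  have h1 : s.length - i = (s.length - (i+1)) + 1 := by omega
  rw [h1, List.range'_succ, List.filter_cons]
  split
  · next hp => rw [if_pos (by simpa using hp)]; rfl
  · next hp => rw [if_neg (by simpa using hp)]; rfl

theorem pvCands_eq_of_none (s : List Char) (a b : Nat) (hab : a ≤ b)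
    (h : ∀ j, a ≤ j → j < b → ¬ pvCand s j) : pvCands s a = pvCands s b := by
  induction b with
  | zero => rw [Nat.le_zero.mp hab]
  | succ n ih =>
    rcases Nat.lt_or_ge a (n+1) with hlt | hge
    · have ha : a ≤ n := by omega
      rw [ih ha (fun j hj1 hj2 => h j hj1 (by omega))]
      by_cases hn : n < s.length
      · rw [pvCands_succ s n hn, if_neg (h n ha (by omega))]
        rfl
      · rw [pvCands_stop s n (by omega), pvCands_stop s (n+1) (by omega)]
    · have : a = n + 1 := by omega
      rw [this]

theorem pv_mem_cands (s : List Char) (a j : Nat) (h : j ∈ pvCands s a) :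
    a ≤ j ∧ j < s.length ∧ pvCand s j := by
  unfold pvCands at h
  have h1 := List.mem_filter.mp h
  have h2 := List.mem_range'.mp h1.1
  refine ⟨by omega, by omega, by simpa using h1.2⟩

theorem pvCands_match (s : List Char) (i : Nat) (h : i < s.length) (hc : pvCand s i) :
    pvCands s i = i :: pvCands s (pvEndOf s i) := by
  rw [pvCands_succ s i h, if_pos hc,
      pvCands_eq_of_none s (i+1) (pvEndOf s i) (by unfold pvEndOf; split <;> omega)
        (fun j hj1 hj2 => pv_no_cand_inside s i hc j (by omega) hj2)]
  rfl

-- ---- emit-side lemmas ----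
theorem pvEmitG_shift (s : List Char) (i : Nat) (cur : List Char) (L : List Nat)
    (h : i < s.length) (hL : ∀ j ∈ L, i + 1 ≤ j) :
    pvEmitG s i cur L = pvEmitG s (i+1) (cur ++ [s.getD i ' ']) L := by
  have hdrop : s.drop i = s.getD i ' ' :: s.drop (i+1) := by
    rw [List.getD_eq_getElem s ' ' h]
    exact List.drop_eq_getElem_cons h
  cases L with
  | nil =>
    unfold pvEmitG
    rw [hdrop]
    simp
  | cons j rest =>
    unfold pvEmitG
    have hj : i + 1 ≤ j := hL j (by simp)
    have h1 : (s.drop i).take (j - i) = s.getD i ' ' :: (s.drop (i+1)).take (j - (i+1)) := by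
      rw [hdrop]
      have : j - i = (j - (i+1)) + 1 := by omega
      rw [this, List.take_succ_cons]
    rw [h1]
    simp

theorem pvB_emit_eq (s : List Char) (L : List Nat) :
    ∀ prev parts, pvB_emit s prev (L.map (fun j => (j, pvEndOf s j))) parts
      = parts ++ pvEmitG s prev [] L := by
  induction L with
  | nil =>
    intro prev parts
    simp only [List.map_nil]
    unfold pvB_emit pvEmitG
    by_cases hseg : PySem.Chars.strip (s.drop prev) = [] <;> simp [hseg]
  | cons j rest ih =>
    intro prev parts
    rw [List.map_cons]
    unfold pvB_emit pvEmitG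
    rw [ih (pvEndOf s j)]
    simp only [List.nil_append]
    split <;> simp

-- ---- scan invariant ----
theorem pvB_scan_eq (s : List Char) : ∀ k i bounds, s.length - i ≤ k →
    pvB_scan s i (pvDepthAt s i) bounds
      = bounds ++ (pvCands s i).map (fun j => (j, pvEndOf s j)) := by
  intro k
  induction k with
  | zero =>
    intro i bounds hk
    unfold pvB_scan
    rw [if_neg (by omega), pvCands_stop s i (by omega)]
    simp
  | succ n ih =>
    intro i bounds hk
    by_cases h : i < s.length
    case neg =>
      unfold pvB_scan
      rw [if_neg h, pvCands_stop s i (by omega)]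
      simp
    case pos =>
      unfold pvB_scan
      rw [if_pos h]
      simp only []
      have hdep : (if s.getD i ' ' = '(' then pvDepthAt s i + 1
          else if s.getD i ' ' = ')' then pvDepthAt s i - 1 else pvDepthAt s i)
          = pvDepthAt s (i+1) := (pvDepthAt_succ s i h).symm
      rw [hdep, ih (i+1) _ (by omega), pvCands_succ s i h]
      by_cases hc : pvCand s i
      · rw [if_pos ⟨hc.1, hc.2.1, hc.2.2⟩]
        have hend : (if i + 8 < s.length ∧
            ((s.drop (i+5)).take 4).map PySem.Chars.upperChar = [' ','A','L','L']
            then i+9 else i+5) = pvEndOf s i := by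
          unfold pvEndOf pvHasAll; rfl
        rw [hend, if_pos hc]
        simp
      · rw [if_neg (fun hh => hc ⟨hh.1, hh.2.1, hh.2.2⟩), if_neg hc]
        simp

-- ---- main invariant for A's loop ----
theorem pvA_loop_eq (s : List Char) : ∀ k i cur parts, s.length - i ≤ k →
    pvA_loop s i (pvDepthAt s i) cur parts = parts ++ pvEmitG s i cur (pvCands s i) := by
  intro k
  induction k with
  | zero =>
    intro i cur parts hk
    unfold pvA_loop
    rw [dif_neg (by omega), pvCands_stop s i (by omega)]
    unfold pvEmitG
    rw [List.drop_of_length_le (by omega)]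
    simp only [List.append_nil]
    split <;> simp
  | succ n ih =>
    intro i cur parts hk
    by_cases h : i < s.length
    case neg =>
      unfold pvA_loop
      rw [dif_neg h, pvCands_stop s i (by omega)]
      unfold pvEmitG
      rw [List.drop_of_length_le (by omega)]
      simp only [List.append_nil]
      split <;> simp
    case pos =>
      unfold pvA_loop
      rw [dif_pos h]
      by_cases hc : pvCand s i
      case pos =>
        rw [if_pos ⟨hc.2.1, hc.1, hc.2.2⟩]
        simp only []
        have hcnd : pvCands s i = i :: pvCands s (pvEndOf s i) := pvCands_match s i h hc
        have hall_eq : ((i+5) + 3 < s.length ∧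
            ((s.drop (i+5)).take 4).map PySem.Chars.upperChar = [' ','A','L','L'])
            ↔ pvHasAll s i := by
          unfold pvHasAll
          constructor <;> (intro hh; exact ⟨by omega, hh.2⟩)
        have hdeq : pvDepthAt s i = pvDepthAt s (pvEndOf s i) := (pvDepthAt_endOf s i hc).symm
        have hrec : pvA_loop s (pvEndOf s i) (pvDepthAt s i) [] (if PySem.Chars.strip cur ≠ [] then parts ++ [PySem.Chars.strip cur] else parts)
            = (if PySem.Chars.strip cur ≠ [] then parts ++ [PySem.Chars.strip cur] else parts)
              ++ pvEmitG s (pvEndOf s i) [] (pvCands s (pvEndOf s i)) := by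
          rw [hdeq]
          exact ih (pvEndOf s i) _ _ (by unfold pvEndOf; split <;> omega)
        rw [hcnd]
        unfold pvEmitG
        simp only [Nat.sub_self, List.take_zero, List.append_nil]
        by_cases hall : pvHasAll s i
        · rw [if_pos (hall_eq.mpr hall)]
          have : pvEndOf s i = i + 9 := by unfold pvEndOf; rw [if_pos hall]
          rw [← this, hrec]
          split <;> simp
        · rw [if_neg (fun hh => hall (hall_eq.mp hh))]
          have : pvEndOf s i = i + 5 := by unfold pvEndOf; rw [if_neg hall]
          rw [← this, hrec]
          split <;> simp
      case neg =>
        rw [if_neg (fun hh => hc ⟨hh.2.1, hh.1, hh.2.2⟩)]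
        simp only []
        have hdep : (if s.getD i ' ' = '(' then pvDepthAt s i + 1
            else if s.getD i ' ' = ')' then pvDepthAt s i - 1 else pvDepthAt s i)
            = pvDepthAt s (i+1) := (pvDepthAt_succ s i h).symm
        rw [hdep, ih (i+1) _ _ (by omega)]
        have hcnd : pvCands s i = pvCands s (i+1) := by
          rw [pvCands_succ s i h, if_neg hc]; rfl
        rw [hcnd, pvEmitG_shift s i cur (pvCands s (i+1)) h
          (fun j hj => (pv_mem_cands s (i+1) j hj).1)]

-- ===== VERDICT (by name: the statement is the Claim_ definition above) =====
theorem parse_union_spec : Claim_equal_parse_union := by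
  intro q _
  unfold Spec_parse_union parse_union parse_union_alt
  simp only []
  have h0 : (0 : Int) = pvDepthAt q.toList 0 := rfl
  rw [h0, pvA_loop_eq q.toList q.toList.length 0 [] [] (by omega),
      pvB_scan_eq q.toList q.toList.length 0 [] (by omega)]
  simp only [List.nil_append]
  rw [pvB_emit_eq q.toList (pvCands q.toList 0) 0 []]
  simp
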